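-- pv_equiv track=rewrite | github.com/Zaki-1052/Yeast_MSA | scripts/genomic_context_analysis.py | detect_homopolymer
-- ===== SOURCE A (Python) =====
-- def detect_homopolymer(sequence, variant_index, window=20, min_length=3):
--     """Detect homopolymers near the variant position."""
--     # Extract region around variant
--     start = max(0, variant_index - window)
--     end = min(len(sequence), variant_index + window + 1)
--     region = sequence[start:end]
--
--     # Search for homopolymers
--     for base in 'ACGT':
--         pattern = base * min_length
--         if pattern in region:
--             return True
--
--     return False
-- ===== SOURCE B (Python) =====
-- def detect_homopolymer(sequence, variant_index, window=20, min_length=3):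
--     """Detect homopolymers near the variant position (single run-length pass)."""
--     start = max(0, variant_index - window)
--     end = min(len(sequence), variant_index + window + 1)
--     region = sequence[start:end]
--
--     if min_length <= 0:
--         # the empty pattern is a substring of any region
--         return True
--
--     prev = None
--     run = 0
--     for ch in region:
--         run = run + 1 if ch == prev else 1
--         prev = ch
--         if ch in 'ACGT' and run >= min_length:
--             return True
--     return False
-- ===== Notes on version B (the rewrite author's own statement) =====
-- stated objective: alternative
-- what changed: Replaces the four substring searches (one per base, each scanning the region) by a single left-to-right run-length pass over the region that tracks the current character and its consecutive run length.
import Mathlib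
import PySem

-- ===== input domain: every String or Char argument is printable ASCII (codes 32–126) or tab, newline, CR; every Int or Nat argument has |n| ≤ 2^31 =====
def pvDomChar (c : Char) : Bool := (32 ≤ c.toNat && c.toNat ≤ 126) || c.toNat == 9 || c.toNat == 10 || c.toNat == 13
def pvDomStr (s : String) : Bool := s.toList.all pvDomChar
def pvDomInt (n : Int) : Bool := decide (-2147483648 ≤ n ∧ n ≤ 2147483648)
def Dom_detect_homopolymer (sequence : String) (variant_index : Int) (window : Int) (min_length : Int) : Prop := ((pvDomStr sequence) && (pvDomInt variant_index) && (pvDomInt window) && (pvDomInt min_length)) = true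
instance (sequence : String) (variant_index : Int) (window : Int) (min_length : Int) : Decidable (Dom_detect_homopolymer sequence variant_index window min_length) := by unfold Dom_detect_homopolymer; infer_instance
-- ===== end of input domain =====

-- B replaces A's four substring searches over the region by a single run-length pass (alternative algorithm; equivalence proved on all inputs).


-- ===== PORT A =====
-- literal transliteration of A: extract the region, then for each base of 'ACGT'
-- test 'base * min_length in region'
def detect_homopolymer (sequence : String) (variant_index : Int) (window : Int) (min_length : Int) : Bool :=
  let s := sequence.toList
  let start : Int := max 0 (variant_index - window)
  let stop : Int := min ((s.length : Int)) (variant_index + window + 1)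
  let region := PySem.List.slice s (some start) (some stop)
  ("ACGT".toList).any (fun base => PySem.Chars.isIn (PySem.List.pyRepeat [base] min_length) region)

-- ===== PORT B =====
-- Source B's "ch in 'ACGT'"
def pvBase (c : Char) : Bool := c == 'A' || c == 'C' || c == 'G' || c == 'T'

-- Source B's loop: prev = last character seen (none initially), run = its current consecutive run length
def pvRunScan (n : Int) : List Char → Option Char → Int → Bool
  | [], _, _ => false
  | c :: rest, prev, run =>
    let run' : Int := if some c = prev then run + 1 else 1
    if pvBase c ∧ n ≤ run' then true
    else pvRunScan n rest (some c) run'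

def detect_homopolymer_alt (sequence : String) (variant_index : Int) (window : Int) (min_length : Int) : Bool :=
  let s := sequence.toList
  let start : Int := max 0 (variant_index - window)
  let stop : Int := min ((s.length : Int)) (variant_index + window + 1)
  let region := PySem.List.slice s (some start) (some stop)
  if min_length ≤ 0 then true
  else pvRunScan min_length region none 0

-- ===== PRECONDITION & SPEC =====
def Spec_detect_homopolymer (sequence : String) (variant_index : Int) (window : Int) (min_length : Int) (out : Bool) : Prop := out = detect_homopolymer_alt sequence variant_index window min_length
instance (sequence : String) (variant_index : Int) (window : Int) (min_length : Int) (out : Bool) : Decidable (Spec_detect_homopolymer sequence variant_index window min_length out) := by unfold Spec_detect_homopolymer; infer_instance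

-- ===== CLAIM (what is proved, stated in full; the proofs are below) =====
def Claim_equal_detect_homopolymer : Prop := ∀ (sequence : String) (variant_index : Int) (window : Int) (min_length : Int), Dom_detect_homopolymer sequence variant_index window min_length → Spec_detect_homopolymer sequence variant_index window min_length (detect_homopolymer sequence variant_index window min_length)

-- ===== LEMMAS AND PROOFS =====

-- the characterisation both ports are reduced to: a run of N equal ACGT characters
-- starts at some position j of l
def pvHasRun (N : Nat) (l : List Char) : Prop :=
  ∃ c, pvBase c = true ∧ ∃ j : Nat, List.replicate N c <+: l.drop j

theorem pv_drop_rep_append_le {α : Type} (p : α) (l : List α) (k j : Nat) (h : j ≤ k) :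
    (List.replicate k p ++ l).drop j = List.replicate (k - j) p ++ l := by
  rw [List.drop_append, List.drop_replicate, List.length_replicate,
    Nat.sub_eq_zero_of_le h, List.drop_zero]

theorem pv_drop_rep_append_ge {α : Type} (p : α) (l : List α) (k j : Nat) (h : k ≤ j) :
    (List.replicate k p ++ l).drop j = l.drop (j - k) := by
  rw [List.drop_append, List.drop_replicate, List.length_replicate,
    Nat.sub_eq_zero_of_le h, List.replicate_zero, List.nil_append]

theorem pv_rep_append_cons {α : Type} (p : α) (r : Nat) (rest : List α) :
    List.replicate r p ++ p :: rest = List.replicate (r + 1) p ++ rest := by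
  rw [List.replicate_succ']; simp

-- a replicate prefix of a list starting with k ≥ 1 copies of p forces c = p
theorem pv_prefix_head {c p : Char} {N k : Nat} {rest : List Char}
    (hN : 0 < N) (hk : 0 < k) (h : List.replicate N c <+: List.replicate k p ++ rest) : c = p := by
  have h0 := h.getElem (i := 0) (by simpa using hN)
  rw [List.getElem_replicate] at h0
  rw [h0, List.getElem_append_left (by simpa using hk), List.getElem_replicate]

-- loop invariant: with a carried run of r copies of p, the scan finds exactly the
-- ACGT runs of length n whose end reaches past the carry
theorem pvRunScan_iff (n : Int) (hn : 1 ≤ n) (l : List Char) : ∀ (p : Char) (r : Nat),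
    pvRunScan n l (some p) (r : Int) = true ↔
    ∃ c, pvBase c = true ∧ ∃ j : Nat, r < j + n.toNat ∧
      List.replicate n.toNat c <+: (List.replicate r p ++ l).drop j := by
  have hN : 1 ≤ n.toNat := by omega
  have hnN : (n.toNat : Int) = n := Int.toNat_of_nonneg (by omega)
  induction l with
  | nil =>
    intro p r
    simp only [pvRunScan, List.append_nil, List.drop_replicate]
    constructor
    · intro h; cases h
    · rintro ⟨c, _, j, hjr, hpre⟩
      have := hpre.length_le
      simp only [List.length_replicate] at this
      omega
  | cons x rest ih =>
    intro p r
    by_cases hx : x = p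
    · subst hx
      have hstep : pvRunScan n (x :: rest) (some x) (r : Int)
          = if pvBase x ∧ n ≤ (r : Int) + 1 then true
            else pvRunScan n rest (some x) ((r : Int) + 1) := by
        simp [pvRunScan]
      rw [hstep, pv_rep_append_cons]
      have hcast : ((r : Int) + 1) = ((r + 1 : Nat) : Int) := by push_cast; ring
      split_ifs with hcheck
      · simp only [true_iff]
        refine ⟨x, hcheck.1, r + 1 - n.toNat, by omega, ?_⟩
        have hle : n.toNat ≤ r + 1 := by omega
        rw [pv_drop_rep_append_le _ _ _ _ (by omega)]
        have : r + 1 - (r + 1 - n.toNat) = n.toNat := by omega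
        rw [this]
        exact List.prefix_append _ _
      · rw [hcast, ih x (r + 1)]
        constructor
        · rintro ⟨c, hc, j, hj, hpre⟩
          exact ⟨c, hc, j, by omega, hpre⟩
        · rintro ⟨c, hc, j, hj, hpre⟩
          by_cases hj2 : r + 1 < j + n.toNat
          · exact ⟨c, hc, j, hj2, hpre⟩
          · -- j + n.toNat = r + 1 : the run ends exactly at x, so the check would have fired
            exfalso
            have hje : j + n.toNat = r + 1 := by omega
            rw [pv_drop_rep_append_le _ _ _ _ (by omega)] at hpre
            have hcp : c = x := pv_prefix_head (by omega) (by omega) hpre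
            subst hcp
            exact hcheck ⟨hc, by omega⟩
    · have hstep : pvRunScan n (x :: rest) (some p) (r : Int)
          = if pvBase x ∧ n ≤ (1 : Int) then true
            else pvRunScan n rest (some x) (1 : Int) := by
        simp [pvRunScan, hx]
      rw [hstep]
      have h1 : ((1 : Nat) : Int) = (1 : Int) := rfl
      split_ifs with hcheck
      · simp only [true_iff]
        refine ⟨x, hcheck.1, r, by omega, ?_⟩
        rw [pv_drop_rep_append_ge _ _ _ _ (le_refl r), Nat.sub_self, List.drop_zero]
        have hN1 : n.toNat = 1 := by omega
        rw [hN1]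
        simp [List.replicate_succ]
      · rw [← h1, ih x 1]
        constructor
        · rintro ⟨c, hc, j', hj', hpre⟩
          refine ⟨c, hc, r + j', by omega, ?_⟩
          rw [pv_drop_rep_append_ge _ _ _ _ (by omega)]
          have : r + j' - r = j' := by omega
          rw [this]
          simpa [List.replicate_succ] using hpre
        · rintro ⟨c, hc, j, hj, hpre⟩
          by_cases hjr : r ≤ j
          · -- witness lies inside x :: rest
            rw [pv_drop_rep_append_ge _ _ _ _ hjr] at hpre
            by_cases hj1 : 1 < (j - r) + n.toNat
            · exact ⟨c, hc, j - r, hj1, by simpa [List.replicate_succ] using hpre⟩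
            · -- j = r, n.toNat = 1 : the check on x would have fired
              exfalso
              have hjr' : j - r = 0 := by omega
              have hN1 : n.toNat = 1 := by omega
              rw [hjr', List.drop_zero, hN1] at hpre
              have hcx : c = x := by
                have h0 := hpre.getElem (i := 0) (by simp)
                simpa using h0
              subst hcx
              exact hcheck ⟨hc, by omega⟩
          · -- witness would have to cross the p/x boundary : impossible
            exfalso
            rw [pv_drop_rep_append_le _ _ _ _ (by omega)] at hpre
            have hcp : c = p := pv_prefix_head (by omega) (by omega) hpre
            have hcx : c = x := by
              have hi : r - j < n.toNat := by omega
              have h0 := hpre.getElem (i := r - j) (by simpa using hi)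
              rw [List.getElem_replicate] at h0
              rw [h0, List.getElem_append_right (by simp)] at hcp ⊢
              simp
            exact hx (hcx ▸ hcp)

-- on the very first character 'run' becomes 1 whatever prev is, so the initial
-- prev = none behaves like any sentinel
theorem pv_scan_none_eq (n : Int) (l : List Char) :
    pvRunScan n l none 0 = pvRunScan n l (some 'A') 0 := by
  cases l with
  | nil => rfl
  | cons x rest =>
    simp only [pvRunScan]
    split_ifs <;> simp_all
    omega

theorem pvRunScan_none_iff (n : Int) (hn : 1 ≤ n) (l : List Char) :
    pvRunScan n l none 0 = true ↔ pvHasRun n.toNat l := by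
  have h := pvRunScan_iff n hn l 'A' 0
  simp only [Nat.cast_zero] at h
  rw [pv_scan_none_eq, h]
  have hN : 1 ≤ n.toNat := by omega
  unfold pvHasRun
  constructor
  · rintro ⟨c, hc, j, _, hpre⟩
    exact ⟨c, hc, j, by simpa using hpre⟩
  · rintro ⟨c, hc, j, hpre⟩
    exact ⟨c, hc, j, by omega, by simpa using hpre⟩

-- A's four substring tests, through Chars.exists_prefix_drop_iff_isIn, say exactly pvHasRun
theorem detect_A_iff (region : List Char) (n : Int) :
    (("ACGT".toList).any
      (fun base => PySem.Chars.isIn (PySem.List.pyRepeat [base] n) region)) = true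
      ↔ pvHasRun n.toNat region := by
  have h1 : ("ACGT".toList) = ['A', 'C', 'G', 'T'] := rfl
  rw [h1]
  simp only [List.any_cons, List.any_nil, Bool.or_eq_true, Bool.or_false,
    PySem.List.pyRepeat_singleton, ← PySem.Chars.exists_prefix_drop_iff_isIn]
  constructor
  · rintro (⟨j, hj⟩ | ⟨j, hj⟩ | ⟨j, hj⟩ | ⟨j, hj⟩)
    · exact ⟨'A', by decide, j, hj⟩
    · exact ⟨'C', by decide, j, hj⟩
    · exact ⟨'G', by decide, j, hj⟩
    · exact ⟨'T', by decide, j, hj⟩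
  · rintro ⟨c, hc, j, hj⟩
    have : c = 'A' ∨ c = 'C' ∨ c = 'G' ∨ c = 'T' := by
      revert hc; unfold pvBase; simp; tauto
    rcases this with h | h | h | h <;> subst h
    · exact Or.inl ⟨j, hj⟩
    · exact Or.inr (Or.inl ⟨j, hj⟩)
    · exact Or.inr (Or.inr (Or.inl ⟨j, hj⟩))
    · exact Or.inr (Or.inr (Or.inr ⟨j, hj⟩))

-- ===== VERDICT (by name: the statement is the Claim_ definition above) =====
theorem detect_homopolymer_spec : Claim_equal_detect_homopolymer := by
  intro sequence variant_index window min_length _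
  unfold Spec_detect_homopolymer detect_homopolymer detect_homopolymer_alt
  set region := PySem.List.slice sequence.toList
    (some (max 0 (variant_index - window)))
    (some (min ((sequence.toList.length : Int)) (variant_index + window + 1))) with hreg
  by_cases hml : min_length ≤ 0
  · -- min_length ≤ 0 : A's patterns are all '' which is in any region, B's guard
    have h0 : min_length.toNat = 0 := by omega
    have h1 : ("ACGT".toList) = ['A', 'C', 'G', 'T'] := rfl
    simp [hml, h1, PySem.List.pyRepeat_singleton, h0, PySem.Chars.isIn_nil]
  · have hml' : 1 ≤ min_length := by omega
    rw [if_neg hml, Bool.eq_iff_iff, detect_A_iff region min_length,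
      pvRunScan_none_iff min_length hml' region]
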